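-- pv_equiv track=rewrite | github.com/Smile-but-say-nothing/scrape | utils/clean_captions.py | clean_sos_eos
-- ===== SOURCE A (Python) =====
-- def clean_sos_eos(raw_caption):
--     cleaned_caption = []
--     for item in raw_caption:
--         if item == "<SOS>" or item == "<UNK>" or item == "<PAD>":
--             continue
--         elif item == "<EOS>":
--             break
--         else:
--             cleaned_caption.append(item)
--     return cleaned_caption
-- ===== SOURCE B (Python) =====
-- def clean_sos_eos(raw_caption):
--     # Stage 1: truncate at the first "<EOS>" (everything before it).
--     try:
--         head = raw_caption[:raw_caption.index("<EOS>")]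
--     except ValueError:
--         head = raw_caption
--     # Stage 2: drop the remaining special tokens.
--     return [t for t in head if t not in {"<SOS>", "<UNK>", "<PAD>"}]
-- ===== Notes on version B (the rewrite author's own statement) =====
-- stated objective: idiomatic
-- what changed: Replaced A's single fused loop with continue/break by two sequential stages: truncate the list at the first <EOS> via index-and-slice, then a comprehension filtering out the special tokens.
import Mathlib
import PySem

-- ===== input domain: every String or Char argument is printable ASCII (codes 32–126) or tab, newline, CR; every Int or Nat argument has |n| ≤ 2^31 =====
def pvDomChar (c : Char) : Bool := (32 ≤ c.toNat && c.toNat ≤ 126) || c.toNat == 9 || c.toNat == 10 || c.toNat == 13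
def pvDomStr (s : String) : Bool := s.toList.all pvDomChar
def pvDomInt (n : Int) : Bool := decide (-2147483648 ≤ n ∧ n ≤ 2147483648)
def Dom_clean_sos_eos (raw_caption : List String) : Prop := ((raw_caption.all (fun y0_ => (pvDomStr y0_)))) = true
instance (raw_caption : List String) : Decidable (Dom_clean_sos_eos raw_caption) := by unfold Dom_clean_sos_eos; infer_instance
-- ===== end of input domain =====

-- B replaces A's fused loop (continue/break) with two stages — truncate at the first "<EOS>", then filter the special tokens — for a more idiomatic decomposition.


-- ===== PORT A =====
-- A's loop with continue/break, as the obvious structural recursion.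
def clean_sos_eos (raw_caption : List String) : List String :=
  match raw_caption with
  | [] => []
  | item :: rest =>
    if item = "<SOS>" ∨ item = "<UNK>" ∨ item = "<PAD>" then
      clean_sos_eos rest
    else if item = "<EOS>" then
      []
    else
      item :: clean_sos_eos rest

-- ===== PORT B =====
-- Stage 1 of Source B: raw_caption[:raw_caption.index("<EOS>")], or the whole list if index raises ValueError.
def cleanHead (raw_caption : List String) : List String :=
  match PySem.List.index? raw_caption "<EOS>" with
  | some i => PySem.List.slice raw_caption none (some (i : Int))
  | none => raw_caption

-- Stage 2: the filtering comprehension.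
def clean_sos_eos_alt (raw_caption : List String) : List String :=
  (cleanHead raw_caption).filter (fun t => decide (t ∉ ["<SOS>", "<UNK>", "<PAD>"]))

-- ===== PRECONDITION & SPEC =====
def Spec_clean_sos_eos (raw_caption : List String) (out : List String) : Prop := out = clean_sos_eos_alt raw_caption
instance (raw_caption : List String) (out : List String) : Decidable (Spec_clean_sos_eos raw_caption out) := by unfold Spec_clean_sos_eos; infer_instance

-- ===== CLAIM (what is proved, stated in full; the proofs are below) =====
def Claim_equal_clean_sos_eos : Prop := ∀ (raw_caption : List String), Dom_clean_sos_eos raw_caption → Spec_clean_sos_eos raw_caption (clean_sos_eos raw_caption)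

-- ===== LEMMAS AND PROOFS =====

lemma cleanHead_nil : cleanHead [] = [] := by simp [cleanHead, PySem.List.index?_eq_idxOf?]

lemma cleanHead_cons (x : String) (xs : List String) :
    cleanHead (x :: xs) = if x = "<EOS>" then [] else x :: cleanHead xs := by
  by_cases hx : x = "<EOS>"
  · subst hx
    rw [cleanHead, PySem.List.index?_cons_self]
    show PySem.List.slice _ none (some ((0 : Nat) : Int)) = _
    rw [PySem.List.slice_to _ (by positivity)]
    simp
  · rw [cleanHead, PySem.List.index?_cons_of_ne xs hx]
    cases h : PySem.List.index? xs "<EOS>" with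
    | none =>
      rw [if_neg hx, cleanHead, h]
      simp
    | some i =>
      simp only [Option.map_some, if_neg hx]
      rw [show cleanHead xs = PySem.List.slice xs none (some ((i : Nat) : Int)) from by
        rw [cleanHead, h]]
      show PySem.List.slice (x :: xs) none (some ((i + 1 : Nat) : Int)) =
        x :: PySem.List.slice xs none (some ((i : Nat) : Int))
      rw [PySem.List.slice_to _ (by positivity), PySem.List.slice_to _ (by positivity)]
      simp

theorem clean_sos_eos_eq (l : List String) : clean_sos_eos l = clean_sos_eos_alt l := by
  induction l with
  | nil => simp [clean_sos_eos, clean_sos_eos_alt, cleanHead_nil]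
  | cons x xs ih =>
    rw [clean_sos_eos, clean_sos_eos_alt, cleanHead_cons]
    by_cases h1 : x = "<SOS>" ∨ x = "<UNK>" ∨ x = "<PAD>"
    · have hx : x ≠ "<EOS>" := by rcases h1 with h|h|h <;> subst h <;> decide
      have hfx : decide (x ∉ ["<SOS>", "<UNK>", "<PAD>"]) = false := by
        rcases h1 with h|h|h <;> simp [h]
      rw [if_pos h1, if_neg hx, List.filter_cons, hfx]
      simp only [Bool.false_eq_true, if_false]
      rw [ih, clean_sos_eos_alt]
    · have hfx : decide (x ∉ ["<SOS>", "<UNK>", "<PAD>"]) = true := by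
        push_neg at h1
        simp [h1.1, h1.2.1, h1.2.2]
      rw [if_neg h1]
      by_cases h2 : x = "<EOS>"
      · simp [h2]
      · rw [if_neg h2, if_neg h2, List.filter_cons, hfx]
        simp only [if_true]
        rw [ih, clean_sos_eos_alt]

-- ===== VERDICT (by name: the statement is the Claim_ definition above) =====
theorem clean_sos_eos_spec : Claim_equal_clean_sos_eos := by
  intro l _
  exact clean_sos_eos_eq l
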